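-- pv_equiv track=rewrite | github.com/bmd2007/benchmark_eval | preprocess/PreprocessUtils.py | MCDEncode
-- ===== SOURCE A (Python) =====
-- def MCDEncode(fastas,splits,uniqueString='_+_'):
-- 	newFastas = []
-- 	for item in fastas:
-- 		name = item[0]
-- 		st = item[1]
-- 		intervals = [0]
-- 		for i in range(1,splits):
-- 			intervals.append((len(st)*i)//(splits))
-- 		intervals.append(len(st))
-- 		#skip empty and full strings
-- 		for newIdx in range(1,2**splits-1):
-- 			curSt = ''
-- 			idx = newIdx
-- 			newName = name+uniqueString+str(idx-1)
-- 			for i in range(0,splits):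
-- 				if newIdx % 2 == 1:
-- 					curSt += st[intervals[i]:intervals[i+1]]
-- 				newIdx = newIdx // 2
-- 			newFastas.append([newName,curSt])
-- 	return (newFastas,2**splits-2)
-- ===== SOURCE B (Python) =====
-- def MCDEncode(fastas, splits, uniqueString='_+_'):
--     newFastas = []
--     total = 2 ** splits
--     for item in fastas:
--         name = item[0]
--         st = item[1]
--         n = len(st)
--         segs = [st[(n * i) // splits:(n * (i + 1)) // splits] for i in range(splits)]
--         # subset-DP: subs[mask] = concatenation of the segments whose bit is set in mask,
--         # each built by ONE concatenation from an already-built smaller subset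
--         subs = ['']
--         for seg in segs:
--             subs += [x + seg for x in subs]
--         for mask in range(1, total - 1):
--             newFastas.append([name + uniqueString + str(mask - 1), subs[mask]])
--     return (newFastas, total - 2)
-- ===== Notes on version B (the rewrite author's own statement) =====
-- stated objective: alternative
-- what changed: Per fasta, B pre-slices the segments once and builds every subset-concatenation by dynamic programming over subsets (iterative doubling: each subs[mask] is one concatenation extending a previously built subset), instead of A's per-mask rebuild that re-slices and scans all split bits for every mask.
import Mathlib
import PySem

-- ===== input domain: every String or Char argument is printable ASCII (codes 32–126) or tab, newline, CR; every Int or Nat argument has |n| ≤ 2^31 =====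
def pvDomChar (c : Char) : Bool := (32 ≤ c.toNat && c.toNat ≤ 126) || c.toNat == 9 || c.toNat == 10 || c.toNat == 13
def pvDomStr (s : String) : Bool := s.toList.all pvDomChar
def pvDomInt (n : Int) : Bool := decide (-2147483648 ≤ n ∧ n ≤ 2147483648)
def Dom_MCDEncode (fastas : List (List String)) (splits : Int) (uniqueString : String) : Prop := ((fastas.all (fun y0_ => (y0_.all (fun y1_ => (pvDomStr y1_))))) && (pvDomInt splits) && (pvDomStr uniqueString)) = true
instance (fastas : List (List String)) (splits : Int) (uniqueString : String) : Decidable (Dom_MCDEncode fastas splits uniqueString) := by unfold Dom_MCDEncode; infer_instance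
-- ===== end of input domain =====

-- B replaces A's per-mask rebuild (re-slicing and scanning all split bits for every mask) by a
-- subset DP: slice the segments once, build every subset-concatenation from a smaller one
-- (iterative doubling), then emit table lookups; an alternative decomposition, same output.


-- ===== PORT A =====
-- literal transliteration of A: per fasta, build the intervals list, then for every mask
-- rebuild the concatenation by scanning all `splits` bits and slicing each selected segment
def MCDEncode (fastas : List (List String)) (splits : Int) (uniqueString : String) : List (List String) × Int :=
  let newFastas := fastas.foldl (fun newFastas item =>
    let name := PySem.List.pyGetD item 0 ""      -- item[0]; Pre_ guarantees the index is in range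
    let st := PySem.List.pyGetD item 1 ""        -- item[1]; Pre_ guarantees the index is in range
    let intervals := (PySem.List.pyRange 1 splits).foldl
      (fun intervals i => intervals ++ [PySem.Int.floordiv (PySem.Str.len st * i) splits]) [(0 : Int)]
    let intervals := intervals ++ [PySem.Str.len st]
    (PySem.List.pyRange 1 ((2 : Int) ^ splits.toNat - 1)).foldl (fun newFastas newIdx =>
      let newName := name ++ uniqueString ++ PySem.Int.toStr (newIdx - 1)
      let res := (PySem.List.pyRange 0 splits).foldl
        (fun (p : String × Int) i =>
          (if PySem.Int.mod p.2 2 = 1 then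
             p.1 ++ PySem.Str.slice st (some (PySem.List.pyGetD intervals i 0))
                                       (some (PySem.List.pyGetD intervals (i + 1) 0))
           else p.1,
           PySem.Int.floordiv p.2 2)) ("", newIdx)
      newFastas ++ [[newName, res.1]]) newFastas) []
  (newFastas, (2 : Int) ^ splits.toNat - 2)

-- ===== PORT B =====
-- literal transliteration of B (Source B): slice the segments once, subset-DP table by doubling,
-- then emit lookups
def MCDEncode_alt (fastas : List (List String)) (splits : Int) (uniqueString : String) : List (List String) × Int :=
  let total : Int := (2 : Int) ^ splits.toNat
  let newFastas := fastas.foldl (fun newFastas item =>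
    let name := PySem.List.pyGetD item 0 ""      -- item[0]; Pre_ guarantees the index is in range
    let st := PySem.List.pyGetD item 1 ""        -- item[1]; Pre_ guarantees the index is in range
    let n := PySem.Str.len st
    let segs := (PySem.List.pyRange 0 splits).map (fun i =>
      PySem.Str.slice st (some (PySem.Int.floordiv (n * i) splits))
                         (some (PySem.Int.floordiv (n * (i + 1)) splits)))
    let subs := segs.foldl (fun subs seg => subs ++ subs.map (fun x => x ++ seg)) [""]
    (PySem.List.pyRange 1 (total - 1)).foldl (fun newFastas mask =>
      newFastas ++ [[name ++ uniqueString ++ PySem.Int.toStr (mask - 1),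
                     PySem.List.pyGetD subs mask ""]]) newFastas) []
  (newFastas, total - 2)

-- ===== PRECONDITION & SPEC =====
-- Pre_ excludes exactly the inputs where Python A raises: splits < 0 (range over a float power,
-- TypeError) and fastas containing an item with fewer than two entries (IndexError on item[0]/item[1]).
def Pre_MCDEncode (fastas : List (List String)) (splits : Int) (uniqueString : String) : Prop :=
  0 ≤ splits ∧ ∀ item ∈ fastas, 2 ≤ item.length

instance (fastas : List (List String)) (splits : Int) (uniqueString : String) : Decidable (Pre_MCDEncode fastas splits uniqueString) := by unfold Pre_MCDEncode; infer_instance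

def pvWitness_MCDEncode : List (List String) × Int × String := ([["p1", "ABCDEF"], ["p2", "xy"]], 2, "_+_")

def Spec_MCDEncode (fastas : List (List String)) (splits : Int) (uniqueString : String) (out : List (List String) × Int) : Prop := out = MCDEncode_alt fastas splits uniqueString
instance (fastas : List (List String)) (splits : Int) (uniqueString : String) (out : List (List String) × Int) : Decidable (Spec_MCDEncode fastas splits uniqueString out) := by unfold Spec_MCDEncode; infer_instance

-- ===== CLAIM (what is proved, stated in full; the proofs are below) =====
def Claim_equal_MCDEncode : Prop := ∀ (fastas : List (List String)) (splits : Int) (uniqueString : String), Dom_MCDEncode fastas splits uniqueString → Pre_MCDEncode fastas splits uniqueString → Spec_MCDEncode fastas splits uniqueString (MCDEncode fastas splits uniqueString)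

-- ===== LEMMAS AND PROOFS =====

-- specification value: concatenation of the segments whose bit is set in the mask, low bit first
def bitsJoin : List String → Nat → String
  | [], _ => ""
  | s :: rest, m => (if m % 2 = 1 then s else "") ++ bitsJoin rest (m / 2)

theorem mix_length (segs : List String) (acc : List String) :
    (segs.foldl (fun subs seg => subs ++ subs.map (fun x => x ++ seg)) acc).length
      = acc.length * 2 ^ segs.length := by
  induction segs generalizing acc with
  | nil => simp
  | cons s rest ih =>
      simp only [List.foldl_cons, ih, List.length_append, List.length_map, List.length_cons]
      ring

theorem mix_factor (segs : List String) (acc : List String) :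
    segs.foldl (fun subs seg => subs ++ subs.map (fun x => x ++ seg)) acc
      = (segs.foldl (fun subs seg => subs ++ subs.map (fun x => x ++ seg)) [""]).flatMap
          (fun t => acc.map (fun x => x ++ t)) := by
  induction segs generalizing acc with
  | nil => simp [String.append_empty]
  | cons s rest ih =>
      simp only [List.foldl_cons]
      rw [ih (acc ++ acc.map (fun x => x ++ s)), ih ([""] ++ [""].map (fun x => x ++ s))]
      simp [List.flatMap_assoc, String.empty_append, String.append_assoc, Function.comp_def]

theorem mix_cons (s : String) (rest : List String) :
    (s :: rest).foldl (fun subs seg => subs ++ subs.map (fun x => x ++ seg)) [""]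
      = (rest.foldl (fun subs seg => subs ++ subs.map (fun x => x ++ seg)) [""]).flatMap
          (fun t => [t, s ++ t]) := by
  simp only [List.foldl_cons]
  rw [mix_factor rest ([""] ++ [""].map (fun x => x ++ s))]
  simp [String.empty_append]

theorem flatMap_pair_getElem? (L : List String) (f g : String → String) (m : Nat) :
    (L.flatMap fun t => [f t, g t])[m]? =
      (L[m / 2]?).map (fun t => if m % 2 = 1 then g t else f t) := by
  induction L generalizing m with
  | nil => simp
  | cons t L ih =>
      match m with
      | 0 => simp
      | 1 => simp
      | (k + 2) =>
          have h2 : (k + 2) / 2 = k / 2 + 1 := by omega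
          have h3 : (k + 2) % 2 = k % 2 := by omega
          simp only [List.flatMap_cons, List.cons_append, List.nil_append,
            List.getElem?_cons_succ, h2, h3]
          exact ih k

theorem subs_get (segs : List String) (m : Nat) (hm : m < 2 ^ segs.length) :
    (segs.foldl (fun subs seg => subs ++ subs.map (fun x => x ++ seg)) [""])[m]?
      = some (bitsJoin segs m) := by
  induction segs generalizing m with
  | nil =>
      have : m = 0 := by simpa using hm
      subst this; simp [bitsJoin]
  | cons s rest ih =>
      rw [mix_cons, flatMap_pair_getElem? _ (fun t => t) (fun t => s ++ t) m]
      have hlt : m / 2 < 2 ^ rest.length := by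
        have := hm; simp only [List.length_cons, pow_succ] at this; omega
      rw [ih (m / 2) hlt]
      simp only [Option.map_some, bitsJoin]
      rcases Nat.mod_two_eq_zero_or_one m with h | h <;> simp [h, String.empty_append]

theorem loopA_eq (segs : List String) (c : String) (m : Nat) :
    (segs.foldl
        (fun (p : String × Int) seg =>
          (if PySem.Int.mod p.2 2 = 1 then p.1 ++ seg else p.1, PySem.Int.floordiv p.2 2))
        (c, (m : Int))).1 = c ++ bitsJoin segs m := by
  induction segs generalizing c m with
  | nil => simp [bitsJoin, String.append_empty]
  | cons s rest ih =>
      have hmod : PySem.Int.mod (m : Int) 2 = ((m % 2 : Nat) : Int) := by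
        exact_mod_cast PySem.Int.mod_natCast m 2
      have hdiv : PySem.Int.floordiv (m : Int) 2 = ((m / 2 : Nat) : Int) := by
        exact_mod_cast PySem.Int.floordiv_natCast m 2
      simp only [List.foldl_cons, hmod, hdiv, ih, bitsJoin]
      rcases Nat.mod_two_eq_zero_or_one m with h | h <;>
        simp [h, String.append_assoc, String.empty_append]

theorem intervals_eq (n splits : Int) (h : 1 ≤ splits) :
    ((PySem.List.pyRange 1 splits).foldl
        (fun intervals i => intervals ++ [PySem.Int.floordiv (n * i) splits]) [(0 : Int)]) ++ [n]
      = (PySem.List.pyRange 0 (splits + 1)).map (fun i => PySem.Int.floordiv (n * i) splits) := by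
  rw [PySem.List.foldl_append_singleton_eq_map, PySem.List.pyRange_one_cons (by omega : (0:Int) < splits + 1)]
  rw [show (0:Int) + 1 = 1 by norm_num, PySem.List.pyRange_one_succ_right (by omega : (1:Int) ≤ splits)]
  have h0 : PySem.Int.floordiv 0 splits = 0 := by
    show (0 : Int).fdiv splits = 0
    simp [Int.zero_fdiv]
  have hs : PySem.Int.floordiv (n * splits) splits = n := by
    show (n * splits).fdiv splits = n
    exact Int.mul_fdiv_cancel n (by omega)
  simp [h0, hs]

-- the core per-mask fact: A's inner rebuild equals B's table lookup
theorem mask_eq (st : String) (splits : Int) (hs : 1 ≤ splits) (mask : Int)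
    (h1 : 1 ≤ mask) (h2 : mask < (2 : Int) ^ splits.toNat - 1) :
    ((PySem.List.pyRange 0 splits).foldl
        (fun (p : String × Int) i =>
          (if PySem.Int.mod p.2 2 = 1 then
             p.1 ++ PySem.Str.slice st (some (PySem.List.pyGetD
                 (((PySem.List.pyRange 1 splits).foldl
                     (fun intervals i => intervals ++ [PySem.Int.floordiv (PySem.Str.len st * i) splits]) [(0 : Int)]) ++ [PySem.Str.len st]) i 0))
               (some (PySem.List.pyGetD
                 (((PySem.List.pyRange 1 splits).foldl
                     (fun intervals i => intervals ++ [PySem.Int.floordiv (PySem.Str.len st * i) splits]) [(0 : Int)]) ++ [PySem.Str.len st]) (i + 1) 0))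
           else p.1,
           PySem.Int.floordiv p.2 2)) ("", mask)).1
      = PySem.List.pyGetD
          (((PySem.List.pyRange 0 splits).map (fun i =>
              PySem.Str.slice st (some (PySem.Int.floordiv (PySem.Str.len st * i) splits))
                                 (some (PySem.Int.floordiv (PySem.Str.len st * (i + 1)) splits)))).foldl
            (fun subs seg => subs ++ subs.map (fun x => x ++ seg)) [""]) mask "" := by
  set n := PySem.Str.len st with hn
  set f : Int → Int := fun i => PySem.Int.floordiv (n * i) splits with hf
  set gseg : Int → String := fun i => PySem.Str.slice st (some (f i)) (some (f (i + 1))) with hg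
  set segs : List String := (PySem.List.pyRange 0 splits).map gseg with hsegs
  have hlen : segs.length = splits.toNat := by
    simp [hsegs, PySem.List.length_pyRange_one]
  -- A side: replace the interval lookups by f, then fold over segs
  have hiv : ∀ i : Int, 0 ≤ i → i ≤ splits →
      PySem.List.pyGetD
        (((PySem.List.pyRange 1 splits).foldl
            (fun intervals i => intervals ++ [PySem.Int.floordiv (n * i) splits]) [(0 : Int)]) ++ [n]) i 0 = f i := by
    intro i hi0 hi1
    rw [intervals_eq n splits hs]
    exact PySem.List.pyGetD_map_pyRange_of_nonneg f (splits + 1) i 0 hi0 (by omega)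
  have hA : ((PySem.List.pyRange 0 splits).foldl
        (fun (p : String × Int) i =>
          (if PySem.Int.mod p.2 2 = 1 then
             p.1 ++ PySem.Str.slice st (some (PySem.List.pyGetD
                 (((PySem.List.pyRange 1 splits).foldl
                     (fun intervals i => intervals ++ [PySem.Int.floordiv (n * i) splits]) [(0 : Int)]) ++ [n]) i 0))
               (some (PySem.List.pyGetD
                 (((PySem.List.pyRange 1 splits).foldl
                     (fun intervals i => intervals ++ [PySem.Int.floordiv (n * i) splits]) [(0 : Int)]) ++ [n]) (i + 1) 0))
           else p.1,
           PySem.Int.floordiv p.2 2)) ("", mask))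
      = ((PySem.List.pyRange 0 splits).foldl
        (fun (p : String × Int) i =>
          (if PySem.Int.mod p.2 2 = 1 then p.1 ++ gseg i else p.1,
           PySem.Int.floordiv p.2 2)) ("", mask)) := by
    apply PySem.List.foldl_congr_mem
    intro acc x hx
    have hxr := (PySem.List.mem_pyRange_one).1 hx
    rw [hiv x hxr.1 (by omega), hiv (x + 1) (by omega) (by omega)]
  rw [hA]
  -- both sides equal bitsJoin segs mask.toNat
  have hmask : mask = ((mask.toNat : Nat) : Int) := by omega
  have hmlt : mask.toNat < 2 ^ splits.toNat := by
    have : ((2:Int) ^ splits.toNat) = ((2 ^ splits.toNat : Nat) : Int) := by push_cast; ring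
    omega
  rw [hmask]
  have hfold : ((PySem.List.pyRange 0 splits).foldl
        (fun (p : String × Int) i =>
          (if PySem.Int.mod p.2 2 = 1 then p.1 ++ gseg i else p.1,
           PySem.Int.floordiv p.2 2)) ("", ((mask.toNat : Nat) : Int)))
      = segs.foldl
        (fun (p : String × Int) seg =>
          (if PySem.Int.mod p.2 2 = 1 then p.1 ++ seg else p.1,
           PySem.Int.floordiv p.2 2)) ("", ((mask.toNat : Nat) : Int)) := by
    rw [hsegs]; simp only [List.foldl_map]
  rw [hfold, loopA_eq segs "" mask.toNat, String.empty_append]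
  have hsub : ((segs.foldl (fun subs seg => subs ++ subs.map (fun x => x ++ seg)) [""]))[mask.toNat]?
      = some (bitsJoin segs mask.toNat) := subs_get segs mask.toNat (by rw [hlen]; exact hmlt)
  have hsublen : ((segs.foldl (fun subs seg => subs ++ subs.map (fun x => x ++ seg)) [""])).length
      = 2 ^ splits.toNat := by rw [mix_length, hlen]; simp
  rw [PySem.List.pyGetD_eq_getElem _ "" (by omega) (by rw [hsublen]; push_cast; omega)]
  have := List.getElem?_eq_getElem (l := segs.foldl (fun subs seg => subs ++ subs.map (fun x => x ++ seg)) [""])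
    (i := mask.toNat) (by rw [hsublen]; exact hmlt)
  rw [this] at hsub
  exact (Option.some_inj.1 hsub).symm

-- ===== VERDICT (by name: the statement is the Claim_ definition above) =====
theorem MCDEncode_spec : Claim_equal_MCDEncode := by
  intro fastas splits uniqueString _ _
  show _ = _
  unfold MCDEncode MCDEncode_alt
  simp only []
  refine Prod.ext ?_ rfl
  show fastas.foldl _ [] = fastas.foldl _ []
  apply PySem.List.foldl_congr_mem
  intro acc item _
  by_cases hs : 1 ≤ splits
  · apply PySem.List.foldl_congr_mem
    intro acc2 mask hmask
    have hmr := (PySem.List.mem_pyRange_one).1 hmask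
    have := mask_eq (PySem.List.pyGetD item 1 "") splits hs mask hmr.1 hmr.2
    rw [this]
  · have hT : (2 : Int) ^ splits.toNat - 1 = 0 := by
      have : splits.toNat = 0 := by omega
      rw [this]; norm_num
    rw [hT, PySem.List.pyRange_one_eq_nil (by omega)]
    simp
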